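-- pv_equiv track=rewrite | github.com/GavinHuttley/PuningAnalysis | src/clock_project/genome_analysis/traids_selection.py | extract_taxonomic_order_info
-- ===== SOURCE A (Python) =====
-- def extract_taxonomic_order_info(taxa_reference, order_reference, species_names):
--     taxanomic_info = {}
--
--     for species in species_names:
--         if species in taxa_reference:
--             order = taxa_reference[species]['order']
--             family = taxa_reference[species]['family']
--             genus = taxa_reference[species]['genus']
--             taxanomic_info[species] = {'order': order, 'family': family, 'genus': genus}
--
--     order_info = {}
--     for species in species_names:
--         for order, species_list in order_reference.items():
--             if species in species_list:
--                 if order not in order_info: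
--                     order_info[order] = []
--                 order_info[order].append(species)
--
--     return taxanomic_info, order_info
-- ===== SOURCE B (Python) =====
-- def extract_taxonomic_order_info(taxa_reference, order_reference, species_names):
--     # Invert order_reference once: species -> [orders containing it, in order_reference order]
--     species_to_orders = {}
--     for order, species_list in order_reference.items():
--         for sp in dict.fromkeys(species_list):
--             species_to_orders.setdefault(sp, []).append(order)
--
--     taxanomic_info = {}
--     order_info = {}
--     for species in species_names:
--         info = taxa_reference.get(species)
--         if info is not None:
--             taxanomic_info[species] = {
--                 'order': info['order'],
--                 'family': info['family'],
--                 'genus': info['genus'],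
--             }
--         for order in species_to_orders.get(species, ()):
--             order_info.setdefault(order, []).append(species)
--
--     return taxanomic_info, order_info
-- ===== Notes on version B (the rewrite author's own statement) =====
-- stated objective: faster
-- what changed: B inverts order_reference once into a species->orders index and then makes a single pass over species_names, instead of A's rescan of every order's species list for every species.
import Mathlib
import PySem

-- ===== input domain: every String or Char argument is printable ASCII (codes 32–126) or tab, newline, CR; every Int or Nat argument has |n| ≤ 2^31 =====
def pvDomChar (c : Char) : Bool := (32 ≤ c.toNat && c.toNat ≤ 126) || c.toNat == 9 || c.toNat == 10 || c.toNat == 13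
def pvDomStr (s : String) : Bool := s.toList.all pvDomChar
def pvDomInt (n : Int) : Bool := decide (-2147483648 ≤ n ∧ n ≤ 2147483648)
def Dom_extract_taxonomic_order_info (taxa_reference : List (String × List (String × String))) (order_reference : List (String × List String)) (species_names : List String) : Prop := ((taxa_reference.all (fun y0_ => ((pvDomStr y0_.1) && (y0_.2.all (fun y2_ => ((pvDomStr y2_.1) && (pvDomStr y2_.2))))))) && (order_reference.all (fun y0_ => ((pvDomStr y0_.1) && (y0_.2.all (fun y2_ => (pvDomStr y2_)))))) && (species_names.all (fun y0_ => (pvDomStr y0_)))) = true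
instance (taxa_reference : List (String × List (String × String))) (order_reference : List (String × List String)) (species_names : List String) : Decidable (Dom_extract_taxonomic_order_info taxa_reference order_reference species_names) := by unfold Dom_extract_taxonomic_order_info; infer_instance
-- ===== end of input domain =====

-- B replaces A's S×O membership rescans by a species→orders index built once from order_reference (asymptotically fewer scans).

-- ===== PORT A =====
-- Literal port of A.  taxa_reference[species][key] is written with the total form `.getD key ""`:
-- Pre_ below excludes exactly the inputs where that lookup would raise KeyError in Python.
def extract_taxonomic_order_info (taxa_reference : List (String × List (String × String))) (order_reference : List (String × List String)) (species_names : List String) : (List (String × List (String × String))) × (List (String × List String)) :=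
  let taD : PySem.Dict String (List (String × String)) := PySem.Dict.ofList taxa_reference
  let orD : PySem.Dict String (List String) := PySem.Dict.ofList order_reference
  let taxanomic_info : PySem.Dict String (List (String × String)) :=
    species_names.foldl (fun acc species =>
      if taD.contains species then
        let rcd : PySem.Dict String String := PySem.Dict.ofList ((taD.get? species).getD [])
        acc.insert species
          [("order", rcd.getD "order" ""), ("family", rcd.getD "family" ""), ("genus", rcd.getD "genus" "")]
      else acc) PySem.Dict.empty
  let order_info : PySem.Dict String (List String) :=
    species_names.foldl (fun acc species =>
      orD.items.foldl (fun acc2 p =>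
        if species ∈ p.2 then acc2.modify p.1 [] (· ++ [species]) else acc2) acc) PySem.Dict.empty
  (taxanomic_info.items, order_info.items)

-- ===== PORT B =====
-- species_to_orders index of Source B: for each (order, species_list), append order to each distinct species' list
def pvIdx (order_reference : List (String × List String)) : PySem.Dict String (List String) :=
  (PySem.Dict.ofList order_reference).items.foldl (fun m p =>
    (PySem.List.dedup p.2).foldl (fun m2 sp => m2.modify sp [] (· ++ [p.1])) m) PySem.Dict.empty

def pvTaxStep (taD : PySem.Dict String (List (String × String)))
    (acc : PySem.Dict String (List (String × String))) (species : String) :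
    PySem.Dict String (List (String × String)) :=
  match taD.get? species with
  | none => acc
  | some info =>
    let rcd : PySem.Dict String String := PySem.Dict.ofList info
    acc.insert species
      [("order", rcd.getD "order" ""), ("family", rcd.getD "family" ""), ("genus", rcd.getD "genus" "")]

def pvOrdStep (idx : PySem.Dict String (List String))
    (acc : PySem.Dict String (List String)) (species : String) : PySem.Dict String (List String) :=
  (idx.getD species []).foldl (fun oi order => oi.modify order [] (· ++ [species])) acc

def extract_taxonomic_order_info_alt (taxa_reference : List (String × List (String × String))) (order_reference : List (String × List String)) (species_names : List String) : (List (String × List (String × String))) × (List (String × List String)) :=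
  let taD : PySem.Dict String (List (String × String)) := PySem.Dict.ofList taxa_reference
  let idx : PySem.Dict String (List String) := pvIdx order_reference
  let res : PySem.Dict String (List (String × String)) × PySem.Dict String (List String) :=
    species_names.foldl (fun acc species => (pvTaxStep taD acc.1 species, pvOrdStep idx acc.2 species))
      (PySem.Dict.empty, PySem.Dict.empty)
  (res.1.items, res.2.items)

-- ===== PRECONDITION & SPEC =====
-- Pre_ excludes exactly the inputs where Python A raises KeyError: a listed species whose
-- taxa_reference record lacks one of the keys 'order', 'family', 'genus' (B raises there too).
def Pre_extract_taxonomic_order_info (taxa_reference : List (String × List (String × String))) (order_reference : List (String × List String)) (species_names : List String) : Prop :=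
  ∀ s ∈ species_names,
    (((PySem.Dict.ofList taxa_reference).get? s).all (fun info =>
      (PySem.Dict.ofList info : PySem.Dict String String).contains "order" &&
      (PySem.Dict.ofList info : PySem.Dict String String).contains "family" &&
      (PySem.Dict.ofList info : PySem.Dict String String).contains "genus")) = true
instance (taxa_reference : List (String × List (String × String))) (order_reference : List (String × List String)) (species_names : List String) : Decidable (Pre_extract_taxonomic_order_info taxa_reference order_reference species_names) := by unfold Pre_extract_taxonomic_order_info; infer_instance

def pvWitness_extract_taxonomic_order_info : (List (String × List (String × String))) × (List (String × List String)) × List String :=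
  ([("cat", [("order", "Carnivora"), ("family", "Felidae"), ("genus", "Felis")])],
   [("Carnivora", ["cat", "dog"])],
   ["cat", "dog"])

def Spec_extract_taxonomic_order_info (taxa_reference : List (String × List (String × String))) (order_reference : List (String × List String)) (species_names : List String) (out : (List (String × List (String × String))) × (List (String × List String))) : Prop := out = extract_taxonomic_order_info_alt taxa_reference order_reference species_names
instance (taxa_reference : List (String × List (String × String))) (order_reference : List (String × List String)) (species_names : List String) (out : (List (String × List (String × String))) × (List (String × List String))) : Decidable (Spec_extract_taxonomic_order_info taxa_reference order_reference species_names out) := by unfold Spec_extract_taxonomic_order_info; infer_instance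

-- ===== CLAIM (what is proved, stated in full; the proofs are below) =====
def Claim_equal_extract_taxonomic_order_info : Prop := ∀ (taxa_reference : List (String × List (String × String))) (order_reference : List (String × List String)) (species_names : List String), Dom_extract_taxonomic_order_info taxa_reference order_reference species_names → Pre_extract_taxonomic_order_info taxa_reference order_reference species_names → Spec_extract_taxonomic_order_info taxa_reference order_reference species_names (extract_taxonomic_order_info taxa_reference order_reference species_names)

-- ===== LEMMAS AND PROOFS =====

-- effect on one key of appending `o` once for every member of a duplicate-free list
lemma foldl_modify_append_nodup (o s : String) :
    ∀ (l : List String), l.Nodup → ∀ (m : PySem.Dict String (List String)),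
      (l.foldl (fun m2 t => m2.modify t [] (· ++ [o])) m).getD s []
        = m.getD s [] ++ (if s ∈ l then [o] else []) := by
  intro l
  induction l with
  | nil => intro _ m; simp
  | cons t ts ih =>
    intro hnd m
    have hnd' := hnd
    rw [List.nodup_cons] at hnd'
    simp only [List.foldl_cons]
    rw [ih hnd'.2, PySem.Dict.getD_modify]
    by_cases hst : s = t
    · subst hst
      have : s ∉ ts := hnd'.1
      simp [this]
    · simp [hst, List.mem_cons]

-- the inner loop of Source B's index build, as seen through one key
lemma idx_step (p : String × List String) (s : String) (m : PySem.Dict String (List String)) :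
    ((PySem.List.dedup p.2).foldl (fun m2 sp => m2.modify sp [] (· ++ [p.1])) m).getD s []
      = m.getD s [] ++ (if s ∈ p.2 then [p.1] else []) := by
  rw [foldl_modify_append_nodup p.1 s _ (PySem.List.nodup_dedup p.2)]
  simp

-- the whole index, as seen through one key: orders whose list contains s, in order
lemma idx_getD_aux (s : String) :
    ∀ (ol : List (String × List String)) (m : PySem.Dict String (List String)),
      (ol.foldl (fun m p => (PySem.List.dedup p.2).foldl (fun m2 sp => m2.modify sp [] (· ++ [p.1])) m) m).getD s []
        = m.getD s [] ++ ((ol.filter (fun p => decide (s ∈ p.2))).map (·.1)) := by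
  intro ol
  induction ol with
  | nil => intro m; simp
  | cons p ps ih =>
    intro m
    simp only [List.foldl_cons]
    rw [ih, idx_step]
    by_cases h : s ∈ p.2 <;> simp [h]

lemma idx_getD (order_reference : List (String × List String)) (s : String) :
    (pvIdx order_reference).getD s []
      = (((PySem.Dict.ofList order_reference).items.filter (fun p => decide (s ∈ p.2))).map (·.1)) := by
  unfold pvIdx
  rw [idx_getD_aux]
  simp

-- A's inner rescan over all orders equals B's walk over the index entry for the species
lemma inner_eq (order_reference : List (String × List String)) (s : String)
    (acc : PySem.Dict String (List String)) :
    (PySem.Dict.ofList order_reference).items.foldl (fun acc2 p =>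
        if s ∈ p.2 then acc2.modify p.1 [] (· ++ [s]) else acc2) acc
      = pvOrdStep (pvIdx order_reference) acc s := by
  unfold pvOrdStep
  rw [idx_getD, List.foldl_map, List.foldl_filter]
  simp

-- A's membership test + double lookup equals B's single get? match, for one species
lemma tax_step_eq (taD : PySem.Dict String (List (String × String)))
    (acc : PySem.Dict String (List (String × String))) (species : String) :
    (if taD.contains species then
        acc.insert species
          [("order", (PySem.Dict.ofList ((taD.get? species).getD []) : PySem.Dict String String).getD "order" ""),
           ("family", (PySem.Dict.ofList ((taD.get? species).getD []) : PySem.Dict String String).getD "family" ""),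
           ("genus", (PySem.Dict.ofList ((taD.get? species).getD []) : PySem.Dict String String).getD "genus" "")]
      else acc)
      = pvTaxStep taD acc species := by
  rw [PySem.Dict.contains_eq_isSome_get?]
  unfold pvTaxStep
  cases taD.get? species <;> simp

-- ===== VERDICT (by name: the statement is the Claim_ definition above) =====
theorem extract_taxonomic_order_info_spec : Claim_equal_extract_taxonomic_order_info := by
  intro taxa_reference order_reference species_names _ _
  unfold Spec_extract_taxonomic_order_info
  unfold extract_taxonomic_order_info extract_taxonomic_order_info_alt
  dsimp only
  rw [PySem.List.foldl_prod_mk]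
  refine congrArg₂ Prod.mk (congrArg PySem.Dict.items ?_) (congrArg PySem.Dict.items ?_)
  · exact PySem.List.foldl_congr_mem _ _ _ _ (fun acc s _ => tax_step_eq _ acc s)
  · exact PySem.List.foldl_congr_mem _ _ _ _ (fun acc s _ => inner_eq order_reference s acc)
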